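-- pv_equiv track=rewrite | github.com/Waspasik/Python | Generators Part 3.py | with_previous
-- ===== SOURCE A (Python) =====
-- def with_previous(iterable):
--     prev_item = None
--     for item in iterable:
--         if prev_item is None:
--             yield item, prev_item
--             prev_item = item
--         else:
--             yield item, prev_item
--             prev_item = item
-- ===== SOURCE B (Python) =====
-- def with_previous(iterable):
--     items = list(iterable)
--     return ((items[i], items[i - 1] if i else None) for i in range(len(items)))
-- ===== Notes on version B (the rewrite author's own statement) =====
-- stated objective: simpler
-- what changed: Drops A's prev_item state machine (with its two identical branches) entirely: B materializes the iterable once and computes each pair by index arithmetic, items[i-1] for i>0 and None at i=0.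
import Mathlib
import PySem

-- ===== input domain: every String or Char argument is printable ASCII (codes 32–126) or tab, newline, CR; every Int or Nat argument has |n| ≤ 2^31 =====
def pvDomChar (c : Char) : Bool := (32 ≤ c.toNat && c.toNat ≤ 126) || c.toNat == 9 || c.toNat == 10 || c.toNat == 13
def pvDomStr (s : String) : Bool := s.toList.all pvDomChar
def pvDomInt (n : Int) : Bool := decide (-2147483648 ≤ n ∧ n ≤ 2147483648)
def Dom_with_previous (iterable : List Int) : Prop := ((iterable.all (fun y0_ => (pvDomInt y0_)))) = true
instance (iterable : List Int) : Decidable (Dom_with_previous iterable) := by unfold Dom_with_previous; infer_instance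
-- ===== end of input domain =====

-- B drops A's prev_item state loop and computes each pair by index: (items[i], items[i-1] if i else None).
-- Equivalence is about the produced sequence of pairs; B materializes the (finite, list) input where A streams it.

-- ===== PORT A =====
-- A's loop: carry prev_item (Option Int), yield (item, prev_item), set prev_item := item.
-- Both branches of A's if/else do the same thing; the port keeps the branch (prev = none vs some).
def with_previous_loop (prev : Option Int) : List Int → List (Int × Option Int)
  | [] => []
  | item :: rest =>
    match prev with
    | none => (item, prev) :: with_previous_loop (some item) rest
    | some _ => (item, prev) :: with_previous_loop (some item) rest

def with_previous (iterable : List Int) : List (Int × Option Int) :=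
  with_previous_loop none iterable

-- ===== PORT B =====
-- items = list(iterable); (items[i], items[i-1] if i else None) for i in range(len(items)).
-- Indices produced by range(len(items)) are in bounds, so items[i] is getD (exact here).
def with_previous_alt (iterable : List Int) : List (Int × Option Int) :=
  (List.range iterable.length).map
    (fun i => (iterable.getD i 0, if i = 0 then none else some (iterable.getD (i - 1) 0)))

-- ===== PRECONDITION & SPEC =====
def Spec_with_previous (iterable : List Int) (out : List (Int × Option Int)) : Prop := out = with_previous_alt iterable
instance (iterable : List Int) (out : List (Int × Option Int)) : Decidable (Spec_with_previous iterable out) := by unfold Spec_with_previous; infer_instance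

-- ===== CLAIM (what is proved, stated in full; the proofs are below) =====
def Claim_equal_with_previous : Prop := ∀ (iterable : List Int), Dom_with_previous iterable → Spec_with_previous iterable (with_previous iterable)

-- ===== LEMMAS AND PROOFS =====
theorem with_previous_loop_index (xs : List Int) : ∀ (p : Option Int),
    with_previous_loop p xs =
      (List.range xs.length).map
        (fun i => (xs.getD i 0, if i = 0 then p else some (xs.getD (i - 1) 0))) := by
  induction xs with
  | nil => intro p; rfl
  | cons x rest ih =>
    intro p
    cases p <;>
      · simp [with_previous_loop, ih (some x), List.range_succ_eq_map, Function.comp_def]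
        intro a ha
        cases a <;> simp

-- ===== VERDICT (by name: the statement is the Claim_ definition above) =====
theorem with_previous_spec : Claim_equal_with_previous := by
  intro iterable _
  unfold Spec_with_previous with_previous with_previous_alt
  exact with_previous_loop_index iterable none
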